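-- pv_equiv track=rewrite | github.com/Hmbown/FluxEM | fluxem-tools-pkg/fluxem_tools/domains/security.py | check_role_hierarchy
-- ===== SOURCE A (Python) =====
-- from typing import Any, Dict, List, Optional, Set, Tuple, Union
--
-- def check_role_hierarchy(user_roles: List[str], required_role: str,
--                          hierarchy: Dict[str, List[str]]) -> bool:
--     """Check if user has required role considering role hierarchy.
--
--     Args:
--         user_roles: Roles the user has
--         required_role: Role required for access
--         hierarchy: Dict mapping roles to their parent roles
--
--     Returns:
--         True if user has required role (directly or through inheritance)
--     """
--     required_lower = required_role.lower().strip()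
--     user_roles_lower = {r.lower().strip() for r in user_roles}
--
--     # Direct match
--     if required_lower in user_roles_lower:
--         return True
--
--     # Check hierarchy - find all roles that grant the required role
--     def get_all_granted_roles(role: str, visited: Set[str] = None) -> Set[str]:
--         if visited is None:
--             visited = set()
--         if role in visited:
--             return set()
--         visited.add(role)
--
--         granted = {role}
--         for parent in hierarchy.get(role, []):
--             granted.update(get_all_granted_roles(parent.lower(), visited))
--         return granted
--
--     # Check if any user role grants the required role
--     for user_role in user_roles_lower:
--         granted = get_all_granted_roles(user_role)
--         if required_lower in granted:
--             return True
--
--     return False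
-- ===== SOURCE B (Python) =====
-- from typing import Dict, List
--
--
-- def check_role_hierarchy(user_roles: List[str], required_role: str,
--                          hierarchy: Dict[str, List[str]]) -> bool:
--     """Single multi-source search over the role graph with one shared seen set."""
--     required = required_role.lower().strip()
--     queue = [r.lower().strip() for r in user_roles]
--     seen = set()
--     i = 0
--     while i < len(queue):
--         role = queue[i]
--         i += 1
--         if role == required:
--             return True
--         if role in seen:
--             continue
--         seen.add(role)
--         queue.extend(p.lower() for p in hierarchy.get(role, []))
--     return False
-- ===== Notes on version B (the rewrite author's own statement) =====
-- stated objective: alternative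
-- what changed: A runs a fresh recursive DFS (with its own visited set) from every user role and tests membership in the full granted set; B does one iterative multi-source worklist search from all user roles with a single shared seen set and exits early when it dequeues the required role; it visits each role at most once overall instead of once per user role.
import Mathlib
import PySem

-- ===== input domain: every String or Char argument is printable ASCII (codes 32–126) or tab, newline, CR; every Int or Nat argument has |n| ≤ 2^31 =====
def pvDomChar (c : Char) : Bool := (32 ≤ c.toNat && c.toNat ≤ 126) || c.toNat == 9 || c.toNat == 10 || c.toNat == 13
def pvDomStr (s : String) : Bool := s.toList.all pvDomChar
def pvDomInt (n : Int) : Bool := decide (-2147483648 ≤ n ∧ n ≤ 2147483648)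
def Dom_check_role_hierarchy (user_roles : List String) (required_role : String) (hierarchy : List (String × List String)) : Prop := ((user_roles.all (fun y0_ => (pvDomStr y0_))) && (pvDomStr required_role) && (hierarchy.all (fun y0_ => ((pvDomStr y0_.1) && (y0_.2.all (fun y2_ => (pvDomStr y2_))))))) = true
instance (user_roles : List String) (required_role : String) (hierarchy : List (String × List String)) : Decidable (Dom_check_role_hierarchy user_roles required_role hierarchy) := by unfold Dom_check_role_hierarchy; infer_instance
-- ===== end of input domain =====

-- B replaces A's per-user-role recursive DFS (a fresh visited set per user role) with ONE iterative
-- worklist search from all user roles sharing a single seen set, with early exit on the required role.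
-- Both ports use a fuel parameter (absent in Python, where recursion/loop terminate because the
-- visited/seen set grows); the fuel expressions are proved in the lemmas below never to run out.

-- ===== PORT A =====
-- hierarchy.get(role, []) on the dict, parents lowered at the use site (as A does with parent.lower())
def pvParents (hierarchy : List (String × List String)) (role : String) : List String :=
  ((PySem.Dict.mk hierarchy).getD role []).map PySem.Str.lower

-- A's inner get_all_granted_roles: visited is mutated in place in Python, so it is threaded
-- through here; the function returns (granted, visited)
def pvDfsA (hierarchy : List (String × List String)) : Nat → String → PySem.Set String → PySem.Set String × PySem.Set String
  | 0, _, visited => (PySem.Set.empty, visited)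
  | fuel+1, role, visited =>
    if PySem.Set.contains visited role then (PySem.Set.empty, visited)
    else
      (pvParents hierarchy role).foldl
        (fun gv parent =>
          let r := pvDfsA hierarchy fuel parent gv.2
          (PySem.Set.update gv.1 r.1, r.2))
        (PySem.Set.add PySem.Set.empty role, PySem.Set.add visited role)

def check_role_hierarchy (user_roles : List String) (required_role : String) (hierarchy : List (String × List String)) : Bool :=
  let required_lower := PySem.Str.strip (PySem.Str.lower required_role)
  let user_roles_lower : PySem.Set String :=
    PySem.Set.ofList (user_roles.map (fun r => PySem.Str.strip (PySem.Str.lower r)))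
  if PySem.Set.contains user_roles_lower required_lower then true
  else
    let fuel := 1 + user_roles.length + (hierarchy.map (fun p => p.2.length)).sum
    List.any user_roles_lower
      (fun u => PySem.Set.contains (pvDfsA hierarchy fuel u PySem.Set.empty).1 required_lower)

-- ===== PORT B =====
-- the while-loop of Source B: queue[i:] is the list argument; queue.extend(...) is the append
def pvBfsB (hierarchy : List (String × List String)) (required : String) : Nat → List String → PySem.Set String → Bool
  | 0, _, _ => false
  | _+1, [], _ => false
  | fuel+1, role :: rest, seen =>
    if role = required then true
    else if PySem.Set.contains seen role then pvBfsB hierarchy required fuel rest seen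
    else pvBfsB hierarchy required fuel (rest ++ pvParents hierarchy role) (PySem.Set.add seen role)

def check_role_hierarchy_alt (user_roles : List String) (required_role : String) (hierarchy : List (String × List String)) : Bool :=
  let required := PySem.Str.strip (PySem.Str.lower required_role)
  let queue := user_roles.map (fun r => PySem.Str.strip (PySem.Str.lower r))
  let p := (hierarchy.map (fun q => q.2.length)).sum
  let fuel := 1 + user_roles.length + (user_roles.length + p) * (1 + p)
  pvBfsB hierarchy required fuel queue PySem.Set.empty

-- ===== PRECONDITION & SPEC =====
def Spec_check_role_hierarchy (user_roles : List String) (required_role : String) (hierarchy : List (String × List String)) (out : Bool) : Prop := out = check_role_hierarchy_alt user_roles required_role hierarchy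
instance (user_roles : List String) (required_role : String) (hierarchy : List (String × List String)) (out : Bool) : Decidable (Spec_check_role_hierarchy user_roles required_role hierarchy out) := by unfold Spec_check_role_hierarchy; infer_instance

-- ===== CLAIM (what is proved, stated in full; the proofs are below) =====
def Claim_equal_check_role_hierarchy : Prop := ∀ (user_roles : List String) (required_role : String) (hierarchy : List (String × List String)), Dom_check_role_hierarchy user_roles required_role hierarchy → Spec_check_role_hierarchy user_roles required_role hierarchy (check_role_hierarchy user_roles required_role hierarchy)

-- ===== LEMMAS AND PROOFS =====

-- reachability in the role graph along edges role → lowered parent, avoiding the set V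
inductive pvRA (hierarchy : List (String × List String)) (V : String → Prop) : String → String → Prop
  | refl (r : String) : ¬ V r → pvRA hierarchy V r r
  | step (r p x : String) : ¬ V r → p ∈ pvParents hierarchy r → pvRA hierarchy V p x → pvRA hierarchy V r x

-- the universe of roles a run can ever visit: the (lowered, stripped) user roles plus every lowered parent
def pvU (user_roles : List String) (hierarchy : List (String × List String)) : List String :=
  user_roles.map (fun r => PySem.Str.strip (PySem.Str.lower r)) ++
    hierarchy.flatMap (fun p => p.2.map PySem.Str.lower)

-- measure for A's recursion: candidates not yet visited
def pvM (U : List String) (V : PySem.Set String) : Nat :=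
  (U.toFinset.filter (fun u => u ∉ V)).card

-- measure for B's loop: stack size plus the expansion potential of unseen candidates
def pvPhi (hierarchy : List (String × List String)) (U : List String) (stack : List String) (seen : PySem.Set String) : Nat :=
  stack.length + ∑ u ∈ U.toFinset.filter (fun u => u ∉ seen), (1 + (pvParents hierarchy u).length)

lemma pvRA_mono {hierarchy : List (String × List String)} {V W : String → Prop}
    (h : ∀ y, V y → W y) : ∀ {r x : String}, pvRA hierarchy W r x → pvRA hierarchy V r x := by
  intro r x hra
  induction hra with
  | refl r hr => exact .refl r (fun hv => hr (h r hv))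
  | step r p x hr hp _ ih => exact .step r p x (fun hv => hr (h r hv)) hp ih

lemma pvRA_trans {hierarchy : List (String × List String)} {V : String → Prop} :
    ∀ {a b c : String}, pvRA hierarchy V a b → pvRA hierarchy V b c → pvRA hierarchy V a c := by
  intro a b c h1
  induction h1 with
  | refl r _ => exact fun h2 => h2
  | step r p x hr hp _ ih => exact fun h2 => .step r p c hr hp (ih h2)

lemma pvRA_not {hierarchy : List (String × List String)} {V : String → Prop} {r x : String}
    (hv : V r) : ¬ pvRA hierarchy V r x := by
  intro h
  cases h with
  | refl _ hr => exact hr hv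
  | step _ _ _ hr _ _ => exact hr hv

-- cut a V-avoiding path at the last occurrence of `role`
lemma pvRA_cut {hierarchy : List (String × List String)} {V : String → Prop} {role : String} :
    ∀ {x q : String}, pvRA hierarchy V x q → q ≠ role →
      pvRA hierarchy (fun y => V y ∨ y = role) x q ∨
        ∃ p ∈ pvParents hierarchy role, pvRA hierarchy (fun y => V y ∨ y = role) p q := by
  intro x q h
  induction h with
  | refl r hr =>
    intro hq
    exact Or.inl (.refl r (fun hc => hc.elim hr hq))
  | step r p x hr hp _ ih =>
    intro hq
    rcases ih hq with h' | h'
    · by_cases hr' : r = role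
      · subst hr'
        exact Or.inr ⟨p, hp, h'⟩
      · exact Or.inl (.step r p x (fun hc => hc.elim hr hr') hp h')
    · exact Or.inr h'

-- nodes already absorbed into Q may be added to the avoid set without losing reachability
lemma pvRA_absorb {hierarchy : List (String × List String)} {V W Q : String → Prop}
    (hW : ∀ y, W y ↔ V y ∨ Q y) (hQ : ∀ y z, Q y → pvRA hierarchy V y z → Q z) :
    ∀ {p x : String}, pvRA hierarchy V p x → pvRA hierarchy W p x ∨ Q x := by
  intro p x h
  induction h with
  | refl r hr =>
    by_cases hw : W r
    · rcases (hW r).mp hw with hv | hq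
      · exact absurd hv hr
      · exact Or.inr (hQ r r hq (.refl r hr))
    · exact Or.inl (.refl r hw)
  | step r p x hr hp hsub ih =>
    by_cases hw : W r
    · rcases (hW r).mp hw with hv | hq
      · exact absurd hv hr
      · exact Or.inr (hQ r x hq (.step r p x hr hp hsub))
    · rcases ih with h' | h'
      · exact Or.inl (.step r p x hw hp h')
      · exact Or.inr h'

-- one unfolding of reachability at a fresh root
lemma pvRA_unfold {hierarchy : List (String × List String)} {V : String → Prop} {role : String}
    (hr : ¬ V role) (x : String) :
    pvRA hierarchy V role x ↔
      (x = role ∨ ∃ p ∈ pvParents hierarchy role, pvRA hierarchy (fun y => V y ∨ y = role) p x) := by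
  constructor
  · intro h
    cases h with
    | refl => exact Or.inl rfl
    | step _ p _ hr2 hp hsub =>
      by_cases hx : x = role
      · exact Or.inl hx
      · rcases pvRA_cut hsub hx with h' | h'
        · exact Or.inr ⟨p, hp, h'⟩
        · exact Or.inr h'
  · intro h
    rcases h with rfl | ⟨p, hp, h'⟩
    · exact .refl _ hr
    · exact .step role p x hr hp (pvRA_mono (fun y hv => Or.inl hv) h')

lemma pvM_mono {U : List String} {V W : PySem.Set String} (h : ∀ x, x ∈ V → x ∈ W) :
    pvM U W ≤ pvM U V := by
  apply Finset.card_le_card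
  intro u hu
  simp only [Finset.mem_filter] at *
  exact ⟨hu.1, fun hv => hu.2 (h u hv)⟩

lemma pvM_add_lt {U : List String} {V : PySem.Set String} {role : String}
    (hU : role ∈ U) (hV : role ∉ V) : pvM U (PySem.Set.add V role) < pvM U V := by
  unfold pvM
  have hfil : U.toFinset.filter (fun u => u ∉ PySem.Set.add V role) =
      (U.toFinset.filter (fun u => u ∉ V)).erase role := by
    ext u
    simp only [Finset.mem_filter, Finset.mem_erase, PySem.Set.mem_add]
    tauto
  rw [hfil]
  exact Finset.card_erase_lt_of_mem (by simp only [Finset.mem_filter, List.mem_toFinset]; exact ⟨hU, hV⟩)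

lemma pvPhi_expand {hierarchy : List (String × List String)} {U rest : List String}
    {seen : PySem.Set String} {role : String} (hU : role ∈ U) (hs : role ∉ seen) :
    pvPhi hierarchy U (rest ++ pvParents hierarchy role) (PySem.Set.add seen role) + 2 =
      pvPhi hierarchy U (role :: rest) seen := by
  unfold pvPhi
  have hfil : U.toFinset.filter (fun u => u ∉ PySem.Set.add seen role) =
      (U.toFinset.filter (fun u => u ∉ seen)).erase role := by
    ext u
    simp only [Finset.mem_filter, Finset.mem_erase, PySem.Set.mem_add]
    tauto
  have hmem : role ∈ U.toFinset.filter (fun u => u ∉ seen) := by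
    simp only [Finset.mem_filter, List.mem_toFinset]; exact ⟨hU, hs⟩
  have hsum := Finset.add_sum_erase (U.toFinset.filter (fun u => u ∉ seen))
    (fun u => 1 + (pvParents hierarchy u).length) hmem
  simp only [] at hsum
  rw [hfil, List.length_append, List.length_cons]
  omega

lemma pvParents_len_le (hierarchy : List (String × List String)) (u : String) :
    (pvParents hierarchy u).length ≤ (hierarchy.map (fun p => p.2.length)).sum := by
  unfold pvParents
  rw [List.length_map]
  induction hierarchy with
  | nil => simp [PySem.Dict.getD, PySem.Dict.get?]
  | cons h t ih =>
    obtain ⟨k, v⟩ := h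
    simp only [PySem.Dict.getD, List.map_cons, List.sum_cons] at ih ⊢
    rw [PySem.Dict.get?_mk_cons]
    by_cases hk : (k == u) = true
    · rw [if_pos hk]
      simp only [Option.getD_some]
      omega
    · rw [if_neg hk]
      omega

lemma pvParents_sub (hierarchy : List (String × List String)) (u x : String)
    (hx : x ∈ pvParents hierarchy u) : x ∈ hierarchy.flatMap (fun p => p.2.map PySem.Str.lower) := by
  unfold pvParents at hx
  induction hierarchy with
  | nil => simp [PySem.Dict.getD, PySem.Dict.get?] at hx
  | cons h t ih =>
    simp only [PySem.Dict.getD] at hx ih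
    rw [show (PySem.Dict.mk (h :: t)) = PySem.Dict.mk ((h.1, h.2) :: t) from rfl,
      PySem.Dict.get?_mk_cons] at hx
    by_cases hk : (h.1 == u) = true
    · rw [if_pos hk] at hx
      simp only [Option.getD_some] at hx
      exact List.mem_flatMap.mpr ⟨h, List.mem_cons_self, hx⟩
    · rw [if_neg hk] at hx
      rcases List.mem_flatMap.mp (ih hx) with ⟨q, hq, hxq⟩
      exact List.mem_flatMap.mpr ⟨q, List.mem_cons_of_mem _ hq, hxq⟩

-- the inner foldl of pvDfsA: invariant over the processed prefix
lemma pvFoldA {hierarchy : List (String × List String)} {U : List String} (fuel : Nat)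
    (ihf : ∀ (V : PySem.Set String) (role : String), role ∈ U → pvM U V < fuel →
      (∀ x, x ∈ (pvDfsA hierarchy fuel role V).1 ↔ pvRA hierarchy (· ∈ V) role x) ∧
      (∀ x, x ∈ (pvDfsA hierarchy fuel role V).2 ↔ x ∈ V ∨ pvRA hierarchy (· ∈ V) role x))
    (V : PySem.Set String) (role : String) :
    ∀ (ps : List String) (g W : PySem.Set String) (Q : String → Prop),
      (∀ p ∈ ps, p ∈ U) →
      (∀ x, x ∈ g ↔ x = role ∨ Q x) →
      (∀ x, x ∈ W ↔ (x ∈ V ∨ x = role) ∨ Q x) →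
      (∀ y z, Q y → pvRA hierarchy (fun y => y ∈ V ∨ y = role) y z → Q z) →
      pvM U (PySem.Set.add V role) < fuel →
      (∀ x, x ∈ (ps.foldl
          (fun gv parent =>
            (PySem.Set.update gv.1 (pvDfsA hierarchy fuel parent gv.2).1,
              (pvDfsA hierarchy fuel parent gv.2).2)) (g, W)).1 ↔
        x = role ∨ Q x ∨ ∃ p ∈ ps, pvRA hierarchy (fun y => y ∈ V ∨ y = role) p x) ∧
      (∀ x, x ∈ (ps.foldl
          (fun gv parent =>
            (PySem.Set.update gv.1 (pvDfsA hierarchy fuel parent gv.2).1,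
              (pvDfsA hierarchy fuel parent gv.2).2)) (g, W)).2 ↔
        (x ∈ V ∨ x = role) ∨ Q x ∨ ∃ p ∈ ps, pvRA hierarchy (fun y => y ∈ V ∨ y = role) p x) := by
  intro ps
  induction ps with
  | nil =>
    intro g W Q _ hg hW _ _
    simp only [List.foldl_nil]
    constructor
    · intro x
      simp only [List.not_mem_nil, false_and, exists_false, or_false]
      exact hg x
    · intro x
      simp only [List.not_mem_nil, false_and, exists_false, or_false]
      exact hW x
  | cons p ps' ih =>
    intro g W Q hps hg hW hQ hmV
    have hWV : ∀ x, x ∈ PySem.Set.add V role → x ∈ W := by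
      intro x hx
      rcases (PySem.Set.mem_add V role x).mp hx with hx | hx
      · exact (hW x).mpr (Or.inl (Or.inl hx))
      · exact (hW x).mpr (Or.inl (Or.inr hx))
    have hWm : pvM U W < fuel := lt_of_le_of_lt (pvM_mono hWV) hmV
    have hspec := ihf W p (hps p List.mem_cons_self) hWm
    have hVpW : ∀ y, (y ∈ V ∨ y = role) → y ∈ W := fun y hy => (hW y).mpr (Or.inl hy)
    simp only [List.foldl_cons]
    have hres := ih (PySem.Set.update g (pvDfsA hierarchy fuel p W).1) (pvDfsA hierarchy fuel p W).2
      (fun x => Q x ∨ pvRA hierarchy (fun y => y ∈ V ∨ y = role) p x)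
      (fun q hq => hps q (List.mem_cons_of_mem _ hq))
      (by
        intro x
        have hf : pvRA hierarchy (· ∈ W) p x → pvRA hierarchy (fun z => z ∈ V ∨ z = role) p x :=
          fun h => pvRA_mono hVpW h
        have hb : pvRA hierarchy (fun z => z ∈ V ∨ z = role) p x →
            pvRA hierarchy (· ∈ W) p x ∨ Q x :=
          fun h => pvRA_absorb hW hQ h
        rw [PySem.Set.mem_update, hg x, hspec.1 x]
        tauto)
      (by
        intro x
        have hf : pvRA hierarchy (· ∈ W) p x → pvRA hierarchy (fun z => z ∈ V ∨ z = role) p x :=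
          fun h => pvRA_mono hVpW h
        have hb : pvRA hierarchy (fun z => z ∈ V ∨ z = role) p x →
            pvRA hierarchy (· ∈ W) p x ∨ Q x :=
          fun h => pvRA_absorb hW hQ h
        rw [hspec.2 x, hW x]
        tauto)
      (by
        intro y z hy hz
        rcases hy with hy | hy
        · exact Or.inl (hQ y z hy hz)
        · exact Or.inr (pvRA_trans hy hz))
      hmV
    constructor
    · intro x
      rw [hres.1 x, List.exists_mem_cons_iff]
      tauto
    · intro x
      rw [hres.2 x, List.exists_mem_cons_iff]
      tauto

lemma pvDfsA_spec {hierarchy : List (String × List String)} {U : List String}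
    (hcl : ∀ r p, p ∈ pvParents hierarchy r → p ∈ U) :
    ∀ (fuel : Nat) (V : PySem.Set String) (role : String), role ∈ U → pvM U V < fuel →
      (∀ x, x ∈ (pvDfsA hierarchy fuel role V).1 ↔ pvRA hierarchy (· ∈ V) role x) ∧
      (∀ x, x ∈ (pvDfsA hierarchy fuel role V).2 ↔ x ∈ V ∨ pvRA hierarchy (· ∈ V) role x) := by
  intro fuel
  induction fuel with
  | zero => intro V role _ h; omega
  | succ fuel ihf =>
    intro V role hrole hm
    by_cases hv : role ∈ V
    · have hc : PySem.Set.contains V role = true := (PySem.Set.contains_iff V role).mpr hv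
      constructor
      · intro x
        simp only [pvDfsA, hc, if_true]
        simp only [PySem.Set.empty, List.not_mem_nil, false_iff]
        exact pvRA_not hv
      · intro x
        simp only [pvDfsA, hc, if_true]
        constructor
        · exact Or.inl
        · rintro (h | h)
          · exact h
          · exact absurd h (pvRA_not hv)
    · have hc : PySem.Set.contains V role = false := by
        rw [← Bool.not_eq_true, PySem.Set.contains_iff]; exact hv
      have hmV : pvM U (PySem.Set.add V role) < fuel := by
        have := pvM_add_lt hrole hv
        omega
      have hfold := pvFoldA fuel ihf V role (pvParents hierarchy role)
        (PySem.Set.add PySem.Set.empty role) (PySem.Set.add V role) (fun _ => False)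
        (fun p hp => hcl role p hp)
        (fun x => by simp [PySem.Set.empty])
        (fun x => by simp [PySem.Set.mem_add])
        (fun y z hy _ => hy)
        hmV
      have hrun : pvDfsA hierarchy (fuel+1) role V =
          (pvParents hierarchy role).foldl
            (fun gv parent =>
              (PySem.Set.update gv.1 (pvDfsA hierarchy fuel parent gv.2).1,
                (pvDfsA hierarchy fuel parent gv.2).2))
            (PySem.Set.add PySem.Set.empty role, PySem.Set.add V role) := by
        simp only [pvDfsA, hc, Bool.false_eq_true, if_false]
      rw [hrun]
      constructor
      · intro x
        rw [hfold.1 x, pvRA_unfold hv x]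
        tauto
      · intro x
        rw [hfold.2 x, pvRA_unfold hv x]
        tauto

lemma pvBfsB_spec {hierarchy : List (String × List String)} {U : List String} {required : String}
    (hcl : ∀ r p, p ∈ pvParents hierarchy r → p ∈ U) :
    ∀ (fuel : Nat) (stack : List String) (seen : PySem.Set String),
      (∀ s ∈ stack, s ∈ U) → required ∉ seen → pvPhi hierarchy U stack seen < fuel →
      (pvBfsB hierarchy required fuel stack seen = true ↔
        ∃ x ∈ stack, pvRA hierarchy (· ∈ seen) x required) := by
  intro fuel
  induction fuel with
  | zero => intro _ _ _ _ h; omega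
  | succ fuel ih =>
    intro stack seen hst hreq hphi
    match stack with
    | [] => simp [pvBfsB]
    | role :: rest =>
      by_cases hrr : role = required
      · have hres : pvBfsB hierarchy required (fuel+1) (role :: rest) seen = true := by
          simp [pvBfsB, hrr]
        rw [hres]
        refine iff_of_true rfl ⟨role, List.mem_cons_self, ?_⟩
        rw [hrr]
        exact .refl required hreq
      · by_cases hsn : role ∈ seen
        · have hc : PySem.Set.contains seen role = true := (PySem.Set.contains_iff seen role).mpr hsn
          have hphi' : pvPhi hierarchy U rest seen < fuel := by
            have : pvPhi hierarchy U (role :: rest) seen =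
                pvPhi hierarchy U rest seen + 1 := by
              simp only [pvPhi, List.length_cons]
              omega
            omega
          rw [show pvBfsB hierarchy required (fuel+1) (role :: rest) seen =
              pvBfsB hierarchy required fuel rest seen from by
                simp [pvBfsB, hrr, hsn]]
          rw [ih rest seen (fun s hs => hst s (List.mem_cons_of_mem _ hs)) hreq hphi']
          constructor
          · rintro ⟨x, hx, h⟩
            exact ⟨x, List.mem_cons_of_mem _ hx, h⟩
          · rintro ⟨x, hx, h⟩
            rcases List.mem_cons.mp hx with rfl | hx
            · exact absurd h (pvRA_not hsn)
            · exact ⟨x, hx, h⟩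
        · have hc : PySem.Set.contains seen role = false := by
            rw [← Bool.not_eq_true, PySem.Set.contains_iff]; exact hsn
          have hphi' : pvPhi hierarchy U (rest ++ pvParents hierarchy role) (PySem.Set.add seen role) < fuel := by
            have := pvPhi_expand (hierarchy := hierarchy) (rest := rest)
              (hU := hst role List.mem_cons_self) (hs := hsn)
            omega
          have hst' : ∀ s ∈ rest ++ pvParents hierarchy role, s ∈ U := by
            intro s hs
            rcases List.mem_append.mp hs with hs | hs
            · exact hst s (List.mem_cons_of_mem _ hs)
            · exact hcl role s hs
          have hreq' : required ∉ PySem.Set.add seen role := by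
            rw [PySem.Set.mem_add]
            rintro (h | h)
            · exact hreq h
            · exact hrr h.symm
          have hconv : ∀ {y : String}, pvRA hierarchy (fun z => z ∈ seen ∨ z = role) y required →
              pvRA hierarchy (· ∈ PySem.Set.add seen role) y required :=
            fun h => pvRA_mono (fun y hy => (PySem.Set.mem_add seen role y).mp hy) h
          rw [show pvBfsB hierarchy required (fuel+1) (role :: rest) seen =
              pvBfsB hierarchy required fuel (rest ++ pvParents hierarchy role) (PySem.Set.add seen role)
              from by simp [pvBfsB, hrr, hsn]]
          rw [ih (rest ++ pvParents hierarchy role) (PySem.Set.add seen role) hst' hreq' hphi']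
          constructor
          · rintro ⟨x, hx, h⟩
            rcases List.mem_append.mp hx with hx | hx
            · exact ⟨x, List.mem_cons_of_mem _ hx,
                pvRA_mono (fun y hy => (PySem.Set.mem_add seen role y).mpr (Or.inl hy)) h⟩
            · exact ⟨role, List.mem_cons_self, .step role x required hsn hx
                (pvRA_mono (fun y hy => (PySem.Set.mem_add seen role y).mpr (Or.inl hy)) h)⟩
          · rintro ⟨x, hx, h⟩
            have hcut := pvRA_cut (role := role) h (fun he => hrr he.symm)
            rcases List.mem_cons.mp hx with rfl | hx
            · rcases hcut with h' | ⟨p, hp, h'⟩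
              · exact absurd h' (pvRA_not (Or.inr rfl))
              · exact ⟨p, List.mem_append.mpr (Or.inr hp), hconv h'⟩
            · rcases hcut with h' | ⟨p, hp, h'⟩
              · exact ⟨x, List.mem_append.mpr (Or.inl hx), hconv h'⟩
              · exact ⟨p, List.mem_append.mpr (Or.inr hp), hconv h'⟩

lemma pvU_cl (user_roles : List String) (hierarchy : List (String × List String)) :
    ∀ r p, p ∈ pvParents hierarchy r → p ∈ pvU user_roles hierarchy :=
  fun r p hp => List.mem_append.mpr (Or.inr (pvParents_sub hierarchy r p hp))

lemma pvU_len (user_roles : List String) (hierarchy : List (String × List String)) :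
    (pvU user_roles hierarchy).length =
      user_roles.length + (hierarchy.map (fun p => p.2.length)).sum := by
  simp [pvU, List.length_append, List.length_map, List.length_flatMap]

lemma pvM_empty_lt (user_roles : List String) (hierarchy : List (String × List String)) :
    pvM (pvU user_roles hierarchy) PySem.Set.empty <
      1 + user_roles.length + (hierarchy.map (fun p => p.2.length)).sum := by
  have h1 : pvM (pvU user_roles hierarchy) PySem.Set.empty ≤ (pvU user_roles hierarchy).length := by
    unfold pvM
    calc (Finset.filter _ _).card
        ≤ (pvU user_roles hierarchy).toFinset.card := Finset.card_le_card (Finset.filter_subset _ _)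
      _ ≤ (pvU user_roles hierarchy).length := List.toFinset_card_le _
  rw [pvU_len] at h1
  omega

lemma pvPhi_init_lt (user_roles : List String) (hierarchy : List (String × List String)) :
    pvPhi hierarchy (pvU user_roles hierarchy)
        (user_roles.map (fun r => PySem.Str.strip (PySem.Str.lower r))) PySem.Set.empty <
      1 + user_roles.length +
        (user_roles.length + (hierarchy.map (fun q => q.2.length)).sum) *
          (1 + (hierarchy.map (fun q => q.2.length)).sum) := by
  unfold pvPhi
  have hfil : (pvU user_roles hierarchy).toFinset.filter (fun u => u ∉ (PySem.Set.empty : PySem.Set String)) =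
      (pvU user_roles hierarchy).toFinset :=
    Finset.filter_true_of_mem (fun u _ => by simp [PySem.Set.empty])
  rw [hfil]
  have hsum : ∑ u ∈ (pvU user_roles hierarchy).toFinset, (1 + (pvParents hierarchy u).length) ≤
      (pvU user_roles hierarchy).toFinset.card * (1 + (hierarchy.map (fun q => q.2.length)).sum) := by
    have := Finset.sum_le_card_nsmul (pvU user_roles hierarchy).toFinset
      (fun u => 1 + (pvParents hierarchy u).length) (1 + (hierarchy.map (fun q => q.2.length)).sum)
      (fun u _ => by
        show 1 + (pvParents hierarchy u).length ≤ 1 + (hierarchy.map (fun q => q.2.length)).sum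
        have := pvParents_len_le hierarchy u
        omega)
    simpa [smul_eq_mul] using this
  have hcard : (pvU user_roles hierarchy).toFinset.card * (1 + (hierarchy.map (fun q => q.2.length)).sum) ≤
      (user_roles.length + (hierarchy.map (fun q => q.2.length)).sum) *
        (1 + (hierarchy.map (fun q => q.2.length)).sum) := by
    apply Nat.mul_le_mul_right
    have := List.toFinset_card_le (pvU user_roles hierarchy)
    rw [pvU_len] at this
    exact this
  have hlen : (user_roles.map (fun r => PySem.Str.strip (PySem.Str.lower r))).length = user_roles.length := by
    simp
  omega

lemma pvA_iff (user_roles : List String) (required_role : String) (hierarchy : List (String × List String)) :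
    check_role_hierarchy user_roles required_role hierarchy = true ↔
      ∃ u ∈ user_roles.map (fun r => PySem.Str.strip (PySem.Str.lower r)),
        pvRA hierarchy (· ∈ (PySem.Set.empty : PySem.Set String)) u
          (PySem.Str.strip (PySem.Str.lower required_role)) := by
  have hcl := pvU_cl user_roles hierarchy
  set rl := PySem.Str.strip (PySem.Str.lower required_role) with hrl
  set srcs := user_roles.map (fun r => PySem.Str.strip (PySem.Str.lower r)) with hsrcs
  by_cases hd : rl ∈ PySem.Set.ofList srcs
  · have hc : PySem.Set.contains (PySem.Set.ofList srcs) rl = true :=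
      (PySem.Set.contains_iff _ _).mpr hd
    have : check_role_hierarchy user_roles required_role hierarchy = true := by
      simp only [check_role_hierarchy, ← hrl, ← hsrcs, hc, if_true]
    rw [this]
    refine iff_of_true rfl ⟨rl, (PySem.Set.mem_ofList srcs rl).mp hd, .refl rl ?_⟩
    simp [PySem.Set.empty]
  · have hc : PySem.Set.contains (PySem.Set.ofList srcs) rl = false := by
      rw [← Bool.not_eq_true, PySem.Set.contains_iff]; exact hd
    have hrun : check_role_hierarchy user_roles required_role hierarchy =
        List.any (PySem.Set.ofList srcs)
          (fun u => PySem.Set.contains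
            (pvDfsA hierarchy (1 + user_roles.length + (hierarchy.map (fun p => p.2.length)).sum) u PySem.Set.empty).1 rl) := by
      simp only [check_role_hierarchy, ← hrl, ← hsrcs, hc, Bool.false_eq_true, if_false]
    rw [hrun, List.any_eq_true]
    constructor
    · rintro ⟨u, hu, hfu⟩
      have humem : u ∈ srcs := (PySem.Set.mem_ofList srcs u).mp hu
      have hspec := (pvDfsA_spec hcl _ PySem.Set.empty u
        (List.mem_append.mpr (Or.inl humem)) (pvM_empty_lt user_roles hierarchy)).1 rl
      exact ⟨u, humem, hspec.mp ((PySem.Set.contains_iff _ _).mp hfu)⟩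
    · rintro ⟨u, hu, hra⟩
      have hspec := (pvDfsA_spec hcl _ PySem.Set.empty u
        (List.mem_append.mpr (Or.inl hu)) (pvM_empty_lt user_roles hierarchy)).1 rl
      exact ⟨u, (PySem.Set.mem_ofList srcs u).mpr hu, (PySem.Set.contains_iff _ _).mpr (hspec.mpr hra)⟩

lemma pvB_iff (user_roles : List String) (required_role : String) (hierarchy : List (String × List String)) :
    check_role_hierarchy_alt user_roles required_role hierarchy = true ↔
      ∃ u ∈ user_roles.map (fun r => PySem.Str.strip (PySem.Str.lower r)),
        pvRA hierarchy (· ∈ (PySem.Set.empty : PySem.Set String)) u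
          (PySem.Str.strip (PySem.Str.lower required_role)) := by
  have hcl := pvU_cl user_roles hierarchy
  have hrun : check_role_hierarchy_alt user_roles required_role hierarchy =
      pvBfsB hierarchy (PySem.Str.strip (PySem.Str.lower required_role))
        (1 + user_roles.length +
          (user_roles.length + (hierarchy.map (fun q => q.2.length)).sum) *
            (1 + (hierarchy.map (fun q => q.2.length)).sum))
        (user_roles.map (fun r => PySem.Str.strip (PySem.Str.lower r))) PySem.Set.empty := by
    simp only [check_role_hierarchy_alt]
  rw [hrun]
  exact pvBfsB_spec hcl _ _ _
    (fun s hs => List.mem_append.mpr (Or.inl hs))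
    (by simp [PySem.Set.empty])
    (pvPhi_init_lt user_roles hierarchy)

-- ===== VERDICT (by name: the statement is the Claim_ definition above) =====
theorem check_role_hierarchy_spec : Claim_equal_check_role_hierarchy := by
  intro user_roles required_role hierarchy _
  unfold Spec_check_role_hierarchy
  exact Bool.eq_iff_iff.mpr
    ((pvA_iff user_roles required_role hierarchy).trans
      (pvB_iff user_roles required_role hierarchy).symm)
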